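-- pv_equiv track=rewrite | github.com/ra1nb0rn/cpe_search | src/cpe_search/cpe_search.py | is_cpe_equal
-- ===== SOURCE A (Python) =====
-- def is_cpe_equal(cpe1, cpe2):
--     """Return True if both CPEs are considered equal, False otherwise"""
--
--     if len(cpe1) != len(cpe2):
--         return False
--
--     for i in range(len(cpe1)):
--         if cpe1[i] != cpe2[i]:
--             if not (cpe1[i] in ("*", "-") and cpe2[i] in ("*", "-")):
--                 return False
--     return True
-- ===== SOURCE B (Python) =====
-- def is_cpe_equal(cpe1, cpe2):
--     """Return True if both CPEs are considered equal, False otherwise"""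
--     def canon(s):
--         return ''.join('*' if ch == '-' else ch for ch in s)
--     return canon(cpe1) == canon(cpe2)
-- ===== Notes on version B (the rewrite author's own statement) =====
-- stated objective: simpler
-- what changed: Replaces the index loop with per-position wildcard special-casing by canonicalizing both strings (every '-' becomes '*') and comparing the canonical forms for equality.
import Mathlib
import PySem

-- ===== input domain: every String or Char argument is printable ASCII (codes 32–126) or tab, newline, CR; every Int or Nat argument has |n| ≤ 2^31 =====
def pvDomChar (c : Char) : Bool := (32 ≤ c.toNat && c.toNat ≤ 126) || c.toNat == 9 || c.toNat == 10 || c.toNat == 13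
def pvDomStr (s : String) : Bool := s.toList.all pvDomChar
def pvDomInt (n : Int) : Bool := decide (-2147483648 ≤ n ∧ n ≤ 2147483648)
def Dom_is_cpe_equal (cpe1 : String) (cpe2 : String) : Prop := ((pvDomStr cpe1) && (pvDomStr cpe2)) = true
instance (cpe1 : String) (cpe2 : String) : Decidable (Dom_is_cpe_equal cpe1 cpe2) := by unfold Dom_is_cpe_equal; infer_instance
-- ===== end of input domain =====

-- B canonicalizes both strings ('-' → '*') and compares, instead of A's index loop with a wildcard branch (objective: simpler).

-- ===== PORT A =====
-- the 'for i in range(len(cpe1))' loop with its early 'return False', as paired recursion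
-- over the two character lists (the length guard has already ensured equal lengths)
def pvLoopA : List Char → List Char → Bool
  | c1 :: t1, c2 :: t2 =>
      if c1 ≠ c2 then
        if ¬ ((c1 = '*' ∨ c1 = '-') ∧ (c2 = '*' ∨ c2 = '-')) then false
        else pvLoopA t1 t2
      else pvLoopA t1 t2
  | _, _ => true

def is_cpe_equal (cpe1 : String) (cpe2 : String) : Bool :=
  if cpe1.toList.length ≠ cpe2.toList.length then false
  else pvLoopA cpe1.toList cpe2.toList

-- ===== PORT B =====
-- canon(s) = ''.join('*' if ch == '-' else ch for ch in s)
def pvCanon (s : String) : List Char :=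
  s.toList.map (fun ch => if ch = '-' then '*' else ch)

def is_cpe_equal_alt (cpe1 : String) (cpe2 : String) : Bool :=
  pvCanon cpe1 == pvCanon cpe2

-- ===== PRECONDITION & SPEC =====
def Spec_is_cpe_equal (cpe1 : String) (cpe2 : String) (out : Bool) : Prop := out = is_cpe_equal_alt cpe1 cpe2
instance (cpe1 : String) (cpe2 : String) (out : Bool) : Decidable (Spec_is_cpe_equal cpe1 cpe2 out) := by unfold Spec_is_cpe_equal; infer_instance

-- ===== CLAIM (what is proved, stated in full; the proofs are below) =====
def Claim_equal_is_cpe_equal : Prop := ∀ (cpe1 : String) (cpe2 : String), Dom_is_cpe_equal cpe1 cpe2 → Spec_is_cpe_equal cpe1 cpe2 (is_cpe_equal cpe1 cpe2)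

-- ===== LEMMAS AND PROOFS =====

-- per-character: the canonical forms agree exactly when A's loop does not reject the pair
theorem pvNorm_eq_iff (c1 c2 : Char) :
    ((if c1 = '-' then '*' else c1) = (if c2 = '-' then '*' else c2)) ↔
      (c1 = c2 ∨ ((c1 = '*' ∨ c1 = '-') ∧ (c2 = '*' ∨ c2 = '-'))) := by
  by_cases h1 : c1 = '-' <;> by_cases h2 : c2 = '-' <;> simp [h1, h2] <;> aesop

-- A's loop (under equal lengths) computes equality of the canonical forms
theorem pvLoopA_eq_canon (l1 l2 : List Char) (h : l1.length = l2.length) :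
    pvLoopA l1 l2 =
      (l1.map (fun ch => if ch = '-' then '*' else ch) ==
       l2.map (fun ch => if ch = '-' then '*' else ch)) := by
  induction l1 generalizing l2 with
  | nil => cases l2 with
    | nil => rfl
    | cons c t => simp at h
  | cons c1 t1 ih =>
    cases l2 with
    | nil => simp at h
    | cons c2 t2 =>
      simp at h
      by_cases hc : (if c1 = '-' then '*' else c1) = (if c2 = '-' then '*' else c2)
      · by_cases hne : c1 = c2
        · simp [pvLoopA, hne, ih t2 h]
        · have hboth := ((pvNorm_eq_iff c1 c2).mp hc).resolve_left hne
          simp [pvLoopA, hne, hboth.1, hboth.2, ih t2 h, hc]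
      · have hboth : ¬ ((c1 = '*' ∨ c1 = '-') ∧ (c2 = '*' ∨ c2 = '-')) :=
          fun hb => hc ((pvNorm_eq_iff c1 c2).mpr (Or.inr hb))
        have hne : c1 ≠ c2 := fun he => hc ((pvNorm_eq_iff c1 c2).mpr (Or.inl he))
        have hb : ((if c1 = '-' then '*' else c1) == (if c2 = '-' then '*' else c2)) = false := by
          simp [hc]
        simp [pvLoopA, hne, hb]
        tauto

-- ===== VERDICT (by name: the statement is the Claim_ definition above) =====
theorem is_cpe_equal_spec : Claim_equal_is_cpe_equal := by
  intro cpe1 cpe2 _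
  unfold Spec_is_cpe_equal is_cpe_equal is_cpe_equal_alt pvCanon
  by_cases hlen : cpe1.toList.length = cpe2.toList.length
  · simp [hlen, pvLoopA_eq_canon _ _ hlen]
  · have hmap : cpe1.toList.map (fun ch => if ch = '-' then '*' else ch) ≠
           cpe2.toList.map (fun ch => if ch = '-' then '*' else ch) := by
      intro h; exact hlen (by simpa using congrArg List.length h)
    have h' : cpe1.length ≠ cpe2.length := by
      simpa [← String.length_toList] using hlen
    simp [h', hmap]
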